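-- pv_equiv track=rewrite | github.com/jamieinhyu/paper-tracker | utils/search.py | normalize_venue
-- ===== SOURCE A (Python) =====
-- def normalize_venue(venue: str) -> str:
--     if not venue:
--         return ""
--     normalized = venue.lower().strip()
--     for char in [".", ",", ":", ";", "&"]:
--         normalized = normalized.replace(char, " ")
--     normalized = " ".join(normalized.split())
--     return normalized
-- ===== SOURCE B (Python) =====
-- def normalize_venue(venue: str) -> str:
--     if not venue:
--         return ""
--     out = []
--     prev_sep = True  # suppresses a leading separator
--     for ch in venue.lower():
--         if ch.isspace() or ch in ".,:;&":
--             if not prev_sep: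
--                 out.append(" ")
--                 prev_sep = True
--         else:
--             out.append(ch)
--             prev_sep = False
--     if out and out[-1] == " ":
--         out.pop()
--     return "".join(out)
-- ===== Notes on version B (the rewrite author's own statement) =====
-- stated objective: alternative
-- what changed: Replaced A's multi-pass pipeline (strip, five replace passes, split, join) by a single left-to-right scan that emits characters and collapses separator runs with a previous-was-separator flag, popping one trailing space at the end.
import Mathlib
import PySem

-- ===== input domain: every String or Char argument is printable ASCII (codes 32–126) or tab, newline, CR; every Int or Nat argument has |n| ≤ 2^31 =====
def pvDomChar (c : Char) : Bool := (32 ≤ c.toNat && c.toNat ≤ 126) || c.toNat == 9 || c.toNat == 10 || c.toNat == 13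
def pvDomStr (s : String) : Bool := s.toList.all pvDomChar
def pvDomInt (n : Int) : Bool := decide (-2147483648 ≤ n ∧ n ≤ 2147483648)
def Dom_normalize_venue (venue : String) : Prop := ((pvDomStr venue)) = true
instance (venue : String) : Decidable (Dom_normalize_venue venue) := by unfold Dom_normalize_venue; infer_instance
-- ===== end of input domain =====

-- B replaces A's multi-pass pipeline (strip, five replaces, split, join) by one
-- left-to-right scan with a previous-was-separator flag (objective: alternative).

-- ===== PORT A =====
def normalize_venue (venue : String) : String :=
  if venue == "" then ""
  else
    -- normalized = venue.lower().strip()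
    let normalized := PySem.Str.strip (PySem.Str.lower venue)
    -- for char in [".", ",", ":", ";", "&"]: normalized = normalized.replace(char, " ")
    let normalized := [".", ",", ":", ";", "&"].foldl
      (fun s ch => PySem.Str.replace s ch " ") normalized
    -- " ".join(normalized.split())
    PySem.Str.join " " (PySem.Str.split₀ normalized)

-- ===== PORT B =====
-- the for-loop of Source B as structural recursion over the same state (out, prev_sep)
def nvGo : List Char → List Char → Bool → List Char
  | [], out, _ => out
  | c :: rest, out, prev =>
    if PySem.Chars.isspace c || (c ∈ ['.', ',', ':', ';', '&']) then
      if prev then nvGo rest out true else nvGo rest (out ++ [' ']) true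
    else nvGo rest (out ++ [c]) false

def normalize_venue_alt (venue : String) : String :=
  if venue == "" then ""
  else
    let out := nvGo (PySem.Str.lower venue).toList [] true
    -- if out and out[-1] == " ": out.pop()
    String.ofList (if out.getLast? = some ' ' then out.dropLast else out)

-- ===== PRECONDITION & SPEC =====
def Spec_normalize_venue (venue : String) (out : String) : Prop := out = normalize_venue_alt venue
instance (venue : String) (out : String) : Decidable (Spec_normalize_venue venue out) := by unfold Spec_normalize_venue; infer_instance

-- ===== CLAIM (what is proved, stated in full; the proofs are below) =====
def Claim_equal_normalize_venue : Prop := ∀ (venue : String), Dom_normalize_venue venue → Spec_normalize_venue venue (normalize_venue venue)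

-- ===== LEMMAS AND PROOFS =====

-- the combined effect of A's five single-character replaces, as one character map
def nvF (c : Char) : Char := if c ∈ (['.', ',', ':', ';', '&'] : List Char) then ' ' else c

-- B's scan with the separator test specialised to whitespace only
def nvGoS : List Char → List Char → Bool → List Char
  | [], out, _ => out
  | c :: rest, out, prev =>
    if PySem.Chars.isspace c then
      if prev then nvGoS rest out true else nvGoS rest (out ++ [' ']) true
    else nvGoS rest (out ++ [c]) false

-- single-character replace is a map
theorem nv_replace_go_single (o n : Char) :
    ∀ (l acc : List Char) (fuel : Nat), l.length ≤ fuel →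
      PySem.Chars.replace.go [o] [n] fuel l acc
        = acc.reverse ++ l.map (fun c => if c = o then n else c) := by
  intro l
  induction l with
  | nil =>
      intro acc fuel _
      cases fuel <;> simp [PySem.Chars.replace.go]
  | cons c t ih =>
      intro acc fuel hf
      cases fuel with
      | zero => simp at hf
      | succ m =>
          simp only [List.length_cons, Nat.succ_le_succ_iff] at hf
          by_cases h : c = o
          · subst h
            simp [PySem.Chars.replace.go, List.isPrefixOf, ih _ m hf]
          · simp [PySem.Chars.replace.go, List.isPrefixOf, h, Ne.symm h, ih _ m hf]

theorem nv_replace_single (s : List Char) (o n : Char) :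
    PySem.Chars.replace s [o] [n] = s.map (fun c => if c = o then n else c) := by
  simp [PySem.Chars.replace, nv_replace_go_single o n s [] s.length (le_refl _)]

theorem nv_isspace_nvF (c : Char) (h : PySem.Chars.isspace c = true) :
    PySem.Chars.isspace (nvF c) = true := by
  unfold nvF; split
  · decide
  · exact h

theorem nv_sep_eq (c : Char) :
    PySem.Chars.isspace (nvF c)
      = (PySem.Chars.isspace c || (c ∈ ['.', ',', ':', ';', '&'])) := by
  unfold nvF
  by_cases h : c ∈ (['.', ',', ':', ';', '&'] : List Char)
  · simp [h]; decide
  · simp [h]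

theorem nvGo_eq_nvGoS : ∀ (cs out : List Char) (prev : Bool),
    nvGo cs out prev = nvGoS (cs.map nvF) out prev := by
  intro cs
  induction cs with
  | nil => intro out prev; rfl
  | cons c rest ih =>
      intro out prev
      simp only [List.map_cons, nvGo, nvGoS, nv_sep_eq c]
      by_cases h : (PySem.Chars.isspace c || (c ∈ ['.', ',', ':', ';', '&'])) = true
      · simp only [h, if_true]
        cases prev <;> simp [ih]
      · simp only [h]
        have hc : nvF c = c := by
          unfold nvF
          have : c ∉ (['.', ',', ':', ';', '&'] : List Char) := by
            intro hm; simp [hm] at h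
          simp [this]
        simp [hc, ih]

-- split₀.go over all-whitespace input
theorem nv_go_all_space : ∀ (ws : List Char) (acc : List (List Char)),
    (∀ c ∈ ws, PySem.Chars.isspace c = true) →
      PySem.Chars.split₀.go ws [] acc = acc.reverse := by
  intro ws
  induction ws with
  | nil => intro acc _; simp [PySem.Chars.split₀.go]
  | cons w ws ih =>
      intro acc h
      have hw := h w (by simp)
      simp [PySem.Chars.split₀.go, hw, ih acc (fun c hc => h c (by simp [hc]))]

theorem nv_go_space_prefix : ∀ (ws s : List Char) (acc : List (List Char)),
    (∀ c ∈ ws, PySem.Chars.isspace c = true) →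
      PySem.Chars.split₀.go (ws ++ s) [] acc = PySem.Chars.split₀.go s [] acc := by
  intro ws
  induction ws with
  | nil => intro s acc _; rfl
  | cons w ws ih =>
      intro s acc h
      have hw := h w (by simp)
      simp [PySem.Chars.split₀.go, hw, ih s acc (fun c hc => h c (by simp [hc]))]

theorem nv_go_space_suffix : ∀ (s ws cur : List Char) (acc : List (List Char)),
    (∀ c ∈ ws, PySem.Chars.isspace c = true) →
      PySem.Chars.split₀.go (s ++ ws) cur acc = PySem.Chars.split₀.go s cur acc := by
  intro s
  induction s with
  | nil =>
      intro ws cur acc h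
      cases ws with
      | nil => rfl
      | cons w ws =>
          have hw := h w (by simp)
          have hall : ∀ c ∈ ws, PySem.Chars.isspace c = true := fun c hc => h c (by simp [hc])
          by_cases hcur : cur = [] <;>
            simp [PySem.Chars.split₀.go, hw, hcur, nv_go_all_space ws _ hall]
  | cons c s ih =>
      intro ws cur acc h
      by_cases hc : PySem.Chars.isspace c = true <;> by_cases hcur : cur = [] <;>
        simp [PySem.Chars.split₀.go, hc, hcur, ih ws _ _ h]

-- split() of the mapped string ignores the strip
theorem nv_split_strip (cs : List Char) :
    PySem.Chars.split₀ ((PySem.Chars.strip cs).map nvF)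
      = PySem.Chars.split₀ (cs.map nvF) := by
  have hdec1 : cs = List.takeWhile PySem.Chars.isspace cs
      ++ PySem.Chars.lstrip cs := by
    simp [PySem.Chars.lstrip, List.takeWhile_append_dropWhile]
  have hdec2 : PySem.Chars.lstrip cs = PySem.Chars.strip cs
      ++ (List.takeWhile PySem.Chars.isspace (PySem.Chars.lstrip cs).reverse).reverse := by
    have := List.takeWhile_append_dropWhile
      (p := PySem.Chars.isspace) (l := (PySem.Chars.lstrip cs).reverse)
    have h2 := congrArg List.reverse this
    simp only [List.reverse_append, List.reverse_reverse] at h2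
    simpa [PySem.Chars.strip, PySem.Chars.rstrip] using h2.symm
  have hws1 : ∀ c ∈ (List.takeWhile PySem.Chars.isspace cs).map nvF,
      PySem.Chars.isspace c = true := by
    intro c hc
    rcases List.mem_map.mp hc with ⟨d, hd, rfl⟩
    exact nv_isspace_nvF d (List.mem_takeWhile_imp hd)
  have hws2 : ∀ c ∈ ((List.takeWhile PySem.Chars.isspace (PySem.Chars.lstrip cs).reverse).reverse).map nvF,
      PySem.Chars.isspace c = true := by
    intro c hc
    rcases List.mem_map.mp hc with ⟨d, hd, rfl⟩
    exact nv_isspace_nvF d (List.mem_takeWhile_imp (List.mem_reverse.mp hd))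
  calc PySem.Chars.split₀ ((PySem.Chars.strip cs).map nvF)
      = PySem.Chars.split₀.go ((PySem.Chars.strip cs).map nvF
          ++ ((List.takeWhile PySem.Chars.isspace (PySem.Chars.lstrip cs).reverse).reverse).map nvF) [] [] := by
        rw [PySem.Chars.split₀, nv_go_space_suffix _ _ _ _ hws2]
    _ = PySem.Chars.split₀.go ((PySem.Chars.lstrip cs).map nvF) [] [] := by
        rw [← List.map_append, ← hdec2]
    _ = PySem.Chars.split₀.go ((List.takeWhile PySem.Chars.isspace cs).map nvF
          ++ (PySem.Chars.lstrip cs).map nvF) [] [] := by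
        rw [nv_go_space_prefix _ _ _ hws1]
    _ = PySem.Chars.split₀ (cs.map nvF) := by
        rw [← List.map_append, ← hdec1, PySem.Chars.split₀]

def nvJ (ws : List (List Char)) : List Char := PySem.Chars.join [' '] ws

theorem nvJ_append_single (xs : List (List Char)) (y : List Char) :
    nvJ (xs ++ [y]) = nvJ xs ++ (if xs = [] then [] else [' ']) ++ y := by
  induction xs with
  | nil => simp [nvJ, PySem.Chars.join, List.intercalate]
  | cons x xs ih =>
      have hcons : ∀ (a b : List Char) (l : List (List Char)),
          nvJ (a :: b :: l) = a ++ [' '] ++ nvJ (b :: l) := by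
        intro a b l
        simp [nvJ, PySem.Chars.join, List.intercalate, List.intersperse]
      cases xs with
      | nil => simp [nvJ, PySem.Chars.join, List.intercalate, List.intersperse]
      | cons z zs =>
          have h1 : x :: (z :: zs) ++ [y] = x :: ((z :: zs) ++ [y]) := by simp
          rw [h1, show x :: ((z :: zs) ++ [y]) = x :: z :: (zs ++ [y]) by simp, hcons,
            show z :: (zs ++ [y]) = (z :: zs) ++ [y] by simp, ih, hcons x z zs]
          simp

def nvOut (acc : List (List Char)) (cur : List Char) : List Char :=
  nvJ acc.reverse ++ (if acc = [] then [] else [' ']) ++ cur.reverse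

def nvPop (l : List Char) : List Char :=
  if l.getLast? = some ' ' then l.dropLast else l

-- main invariant: B's whitespace scan tracks split₀.go
theorem nv_main : ∀ (ds cur : List Char) (acc : List (List Char)),
    (∀ c ∈ cur, PySem.Chars.isspace c = false) →
      nvPop (nvGoS ds (nvOut acc cur) cur.isEmpty)
        = nvJ (PySem.Chars.split₀.go ds cur acc) := by
  intro ds
  induction ds with
  | nil =>
      intro cur acc hcur
      cases cur with
      | nil =>
          cases acc with
          | nil => simp [nvGoS, nvOut, nvPop, nvJ, PySem.Chars.join,
              List.intercalate, PySem.Chars.split₀.go]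
          | cons a as =>
              simp only [nvGoS, nvOut, PySem.Chars.split₀.go, List.isEmpty_nil]
              simp [nvPop]
      | cons h t =>
          have hne : (h :: t).reverse = t.reverse ++ [h] := by simp
          have hlast : ((nvJ acc.reverse ++ (if acc = [] then [] else [' '])) ++ (t.reverse ++ [h])).getLast?
              = some h := by
            rw [← List.append_assoc]
            exact List.getLast?_concat
          have hhs : PySem.Chars.isspace h = false := hcur h (by simp)
          have hh : h ≠ ' ' := by
            intro he; rw [he] at hhs; exact absurd hhs (by decide)
          simp only [nvGoS, PySem.Chars.split₀.go, List.isEmpty_cons,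
            Bool.false_eq_true, if_false]
          rw [nvOut, nvPop, hne]
          rw [if_neg (by simp [hh])]
          rw [show ((t.reverse ++ [h]) :: acc).reverse = acc.reverse ++ [t.reverse ++ [h]] by simp]
          rw [nvJ_append_single]
          simp [nvJ]
  | cons d rest ih =>
      intro cur acc hcur
      by_cases hd : PySem.Chars.isspace d = true
      · cases cur with
        | nil =>
            simp only [nvGoS, PySem.Chars.split₀.go, hd, List.isEmpty_nil, if_true]
            exact ih [] acc (by simp)
        | cons h t =>
            simp only [nvGoS, PySem.Chars.split₀.go, hd, List.isEmpty_cons, if_true,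
              Bool.false_eq_true, if_false]
            have hstep : nvOut acc (h :: t) ++ [' '] = nvOut ((h :: t).reverse :: acc) [] := by
              rw [nvOut, nvOut]
              rw [nvJ, show ((h :: t).reverse :: acc).reverse = acc.reverse ++ [(h :: t).reverse] by simp,
                ← nvJ, nvJ_append_single]
              simp
            rw [hstep]
            have := ih [] ((h :: t).reverse :: acc) (by simp)
            simpa using this
      · simp only [nvGoS, PySem.Chars.split₀.go, hd, Bool.false_eq_true, if_false]
        have hstep : nvOut acc cur ++ [d] = nvOut acc (d :: cur) := by
          simp [nvOut]
        rw [hstep]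
        have := ih (d :: cur) acc (by
          intro c hc
          rcases List.mem_cons.mp hc with rfl | hc
          · simpa using hd
          · exact hcur c hc)
        simpa using this

-- ===== VERDICT (by name: the statement is the Claim_ definition above) =====
theorem nv_map_comp (s : List Char) :
    ((((s.map (fun c => if c = '.' then ' ' else c)).map
        (fun c => if c = ',' then ' ' else c)).map
        (fun c => if c = ':' then ' ' else c)).map
        (fun c => if c = ';' then ' ' else c)).map
        (fun c => if c = '&' then ' ' else c) = s.map nvF := by
  simp only [List.map_map]
  apply List.map_congr_left
  intro c _
  simp only [Function.comp]
  by_cases h1 : c = '.'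
  · subst h1; decide
  by_cases h2 : c = ','
  · subst h2; decide
  by_cases h3 : c = ':'
  · subst h3; decide
  by_cases h4 : c = ';'
  · subst h4; decide
  by_cases h5 : c = '&'
  · subst h5; decide
  have hm : c ∉ (['.', ',', ':', ';', '&'] : List Char) := by
    simp [h1, h2, h3, h4, h5]
  simp [nvF, hm, h1, h2, h3, h4, h5]

-- ===== VERDICT (by name: the statement is the Claim_ definition above) =====
theorem normalize_venue_spec : Claim_equal_normalize_venue := by
  intro venue _
  unfold Spec_normalize_venue normalize_venue normalize_venue_alt
  by_cases hv : venue == ""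
  · simp [hv]
  · simp only [hv, Bool.false_eq_true, if_false]
    refine String.toList_inj.mp ?_
    -- A side to Chars
    rw [PySem.Str.toList_join, PySem.Str.split₀_map_toList]
    rw [show (" " : String).toList = [' '] from rfl]
    simp only [List.foldl_cons, List.foldl_nil, PySem.Str.toList_replace,
      PySem.Str.toList_strip, PySem.Str.toList_lower]
    rw [show ("." : String).toList = ['.'] from rfl,
        show ("," : String).toList = [','] from rfl,
        show (":" : String).toList = [':'] from rfl,
        show (";" : String).toList = [';'] from rfl,
        show ("&" : String).toList = ['&'] from rfl]
    rw [show (" " : String).toList = [' '] from rfl]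
    rw [nv_replace_single, nv_replace_single, nv_replace_single, nv_replace_single,
      nv_replace_single, nv_map_comp]
    rw [show PySem.Chars.join [' ']
          (PySem.Chars.split₀ ((PySem.Chars.strip (PySem.Chars.lower venue.toList)).map nvF))
        = nvJ (PySem.Chars.split₀ ((PySem.Chars.strip (PySem.Chars.lower venue.toList)).map nvF))
        from rfl]
    rw [nv_split_strip]
    -- B side to Chars
    rw [String.toList_ofList]
    rw [show (if (nvGo (PySem.Chars.lower venue.toList) [] true).getLast? = some ' '
          then (nvGo (PySem.Chars.lower venue.toList) [] true).dropLast
          else nvGo (PySem.Chars.lower venue.toList) [] true)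
        = nvPop (nvGo (PySem.Chars.lower venue.toList) [] true) from rfl]
    rw [nvGo_eq_nvGoS]
    have h0 : nvOut [] [] = ([] : List Char) := by
      simp [nvOut, nvJ, PySem.Chars.join, List.intercalate]
    have hmain := nv_main (((PySem.Chars.lower venue.toList)).map nvF) [] [] (by simp)
    rw [h0] at hmain
    simp only [show ([] : List Char).isEmpty = true from rfl] at hmain
    rw [hmain]
    rfl
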